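-- pv_equiv track=rewrite | github.com/bowook/Programmers | 프로그래머스/lv1/42862. 체육복/체육복.py | solution
-- ===== SOURCE A (Python) =====
-- def solution(n, lost, reserve):
--     lost.sort()
--     reserve.sort()
--      #중복삭제
--     for i in lost[:]:
--         if i in reserve:
--             lost.remove(i)
--             reserve.remove(i)
--     #여유분있는애들이 줘야함
--
--     for i in reserve:
--         if i-1 in lost:
--             lost.remove(i-1)
--         elif i+1 in lost:
--             lost.remove(i+1)
--
--     return n-len(lost)
-- ===== SOURCE B (Python) =====
-- def solution(n, lost, reserve):
--     # Two-pointer merge: cancel exact matches by occurrence counts, then scan the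
--     # two sorted leftover lists in parallel, matching pairs at distance <= 1.
--     # (Unlike A, does not mutate its list arguments; return value is identical.)
--     cl = {}
--     for x in lost:
--         cl[x] = cl.get(x, 0) + 1
--     cr = {}
--     for x in reserve:
--         cr[x] = cr.get(x, 0) + 1
--     L = []
--     take = {}
--     for x in sorted(lost):
--         t = take.get(x, 0) + 1
--         take[x] = t
--         if t > cr.get(x, 0):
--             L.append(x)
--     R = []
--     give = {}
--     for x in sorted(reserve):
--         t = give.get(x, 0) + 1
--         give[x] = t
--         if t > cl.get(x, 0):
--             R.append(x)
--     i = j = matched = 0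
--     while i < len(L) and j < len(R):
--         if L[i] < R[j] - 1:
--             i += 1
--         elif L[i] > R[j] + 1:
--             j += 1
--         else:
--             matched += 1
--             i += 1
--             j += 1
--     return n - (len(L) - matched)
-- ===== Notes on version B (the rewrite author's own statement) =====
-- stated objective: faster
-- what changed: Replaces A's per-reserve membership-test-and-remove greedy over mutable lists with a two-pointer merge scan: exact matches are cancelled via occurrence counts, then the two sorted leftover lists are scanned in parallel matching pairs at distance <= 1; B also does not mutate its arguments.
import Mathlib
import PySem

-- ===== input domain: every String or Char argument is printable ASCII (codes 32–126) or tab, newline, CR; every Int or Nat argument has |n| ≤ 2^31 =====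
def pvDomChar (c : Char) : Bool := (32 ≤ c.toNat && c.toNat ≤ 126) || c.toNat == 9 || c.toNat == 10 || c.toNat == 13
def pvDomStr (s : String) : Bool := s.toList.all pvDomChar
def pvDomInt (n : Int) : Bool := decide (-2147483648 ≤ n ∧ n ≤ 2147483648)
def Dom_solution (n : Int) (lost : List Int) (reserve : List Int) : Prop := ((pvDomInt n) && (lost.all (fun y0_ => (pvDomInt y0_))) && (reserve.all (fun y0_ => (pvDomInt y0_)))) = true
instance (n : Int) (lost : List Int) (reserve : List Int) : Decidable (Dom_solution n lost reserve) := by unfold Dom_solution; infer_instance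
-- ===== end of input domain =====

-- B cancels exact matches by occurrence counts and then matches the two sorted leftover
-- lists with a single two-pointer merge scan instead of A's per-reserve membership/remove
-- greedy (objective: faster). A mutates its list arguments in place (sort/remove); B does
-- not — the equivalence proved here is about the return value.

-- ===== PORT A =====
-- Python list.remove(v); in A every call site is guarded so that v is present
-- (remove? is some), hence the .getD fallback is never taken and A never raises.
def pyRemove (l : List Int) (v : Int) : List Int := (PySem.List.remove? l v).getD l

-- body of A's first loop: `if i in reserve: lost.remove(i); reserve.remove(i)`
def aStep1 (st : List Int × List Int) (i : Int) : List Int × List Int :=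
  if st.2.contains i then (pyRemove st.1 i, pyRemove st.2 i) else st

-- body of A's second loop: `if i-1 in lost: … elif i+1 in lost: …`
def aStep2 (l : List Int) (i : Int) : List Int :=
  if l.contains (i - 1) then pyRemove l (i - 1)
  else if l.contains (i + 1) then pyRemove l (i + 1) else l

def solution (n : Int) (lost : List Int) (reserve : List Int) : Int :=
  let lost1 := PySem.List.sorted lost (fun x => x) false
  let res1 := PySem.List.sorted reserve (fun x => x) false
  -- `for i in lost[:]:` iterates the (sorted) copy while mutating both lists
  let st := lost1.foldl aStep1 (lost1, res1)
  let lost3 := st.2.foldl aStep2 st.1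
  n - lost3.length

-- ===== PORT B =====
-- body of B's leftover-building loops: bump this value's seen-count `t`,
-- keep the element iff `t` exceeds the other side's total count for it
def buildStep (cap : PySem.Dict Int Int) (st : PySem.Dict Int Int × List Int) (x : Int) :
    PySem.Dict Int Int × List Int :=
  let t := st.1.getD x 0 + 1
  if t > cap.getD x 0 then (st.1.insert x t, st.2 ++ [x]) else (st.1.insert x t, st.2)

-- B's while loop: two pointers over the sorted leftover lists, matching at distance ≤ 1
def tpLoop (L R : List Int) (matched : Int) : Int :=
  match L, R with
  | [], _ => matched
  | _ :: _, [] => matched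
  | l :: ls, r :: rs =>
    if l < r - 1 then tpLoop ls (r :: rs) matched
    else if l > r + 1 then tpLoop (l :: ls) rs matched
    else tpLoop ls rs (matched + 1)
termination_by L.length + R.length

def solution_alt (n : Int) (lost : List Int) (reserve : List Int) : Int :=
  let cl := lost.foldl (fun d x => d.insert x (d.getD x 0 + 1)) PySem.Dict.empty
  let cr := reserve.foldl (fun d x => d.insert x (d.getD x 0 + 1)) PySem.Dict.empty
  let L := ((PySem.List.sorted lost (fun x => x) false).foldl (buildStep cr)
    (PySem.Dict.empty, [])).2
  let R := ((PySem.List.sorted reserve (fun x => x) false).foldl (buildStep cl)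
    (PySem.Dict.empty, [])).2
  let matched := tpLoop L R 0
  n - ((L.length : Int) - matched)

-- ===== PRECONDITION & SPEC =====
def Spec_solution (n : Int) (lost : List Int) (reserve : List Int) (out : Int) : Prop := out = solution_alt n lost reserve
instance (n : Int) (lost : List Int) (reserve : List Int) (out : Int) : Decidable (Spec_solution n lost reserve out) := by unfold Spec_solution; infer_instance

-- ===== CLAIM (what is proved, stated in full; the proofs are below) =====
def Claim_equal_solution : Prop := ∀ (n : Int) (lost : List Int) (reserve : List Int), Dom_solution n lost reserve → Spec_solution n lost reserve (solution n lost reserve)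

-- ===== LEMMAS AND PROOFS =====

theorem pyRemove_of_mem {l : List Int} {v : Int} (h : v ∈ l) : pyRemove l v = l.erase v := by
  simp [pyRemove, PySem.List.remove?_eq_some_erase l v h]

theorem count_pyRemove {l : List Int} {v : Int} (h : v ∈ l) (x : Int) :
    (pyRemove l v).count x = l.count x - (if v = x then 1 else 0) := by
  rw [pyRemove_of_mem h]
  simp [List.count_erase]

theorem pyRemove_sublist (l : List Int) (v : Int) : (pyRemove l v).Sublist l := by
  by_cases h : v ∈ l
  · rw [pyRemove_of_mem h]; exact List.erase_sublist
  · simp [pyRemove, (PySem.List.remove?_eq_none_iff l v).2 h]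

-- A's first loop, characterised by multiset counts
theorem aPhase1 (P : List Int) : ∀ (L R : List Int), (∀ x, P.count x ≤ L.count x) →
    (∀ x, (P.foldl aStep1 (L, R)).1.count x = L.count x - min (P.count x) (R.count x)) ∧
    (∀ x, (P.foldl aStep1 (L, R)).2.count x = R.count x - min (P.count x) (R.count x)) ∧
    (P.foldl aStep1 (L, R)).1.Sublist L ∧ (P.foldl aStep1 (L, R)).2.Sublist R := by
  induction P with
  | nil => intro L R _; simp
  | cons i P ih =>
    intro L R hle
    have hiP : P.count i + 1 ≤ L.count i := by
      have := hle i
      rwa [List.count_cons_self] at this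
    have hiL : i ∈ L := List.count_pos_iff.1 (by omega)
    by_cases hR : i ∈ R
    · have hRc : 0 < R.count i := List.count_pos_iff.2 hR
      have hstep : aStep1 (L, R) i = (pyRemove L i, pyRemove R i) := by
        simp [aStep1, hR]
      have hle' : ∀ x, P.count x ≤ (pyRemove L i).count x := by
        intro x
        rw [count_pyRemove hiL]
        rcases eq_or_ne x i with rfl | hne
        · simp; omega
        · have := hle x
          rw [List.count_cons_of_ne hne.symm] at this
          simp [Ne.symm hne]; omega
      obtain ⟨h1, h2, h3, h4⟩ := ih (pyRemove L i) (pyRemove R i) hle'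
      rw [List.foldl_cons, hstep]
      refine ⟨?_, ?_, h3.trans (pyRemove_sublist L i), h4.trans (pyRemove_sublist R i)⟩
      · intro x
        rw [h1 x, count_pyRemove hiL, count_pyRemove hR]
        rcases eq_or_ne x i with rfl | hne
        · rw [List.count_cons_self]; simp; omega
        · rw [List.count_cons_of_ne hne.symm]; simp [Ne.symm hne]
      · intro x
        rw [h2 x, count_pyRemove hR]
        rcases eq_or_ne x i with rfl | hne
        · rw [List.count_cons_self]; simp; omega
        · rw [List.count_cons_of_ne hne.symm]; simp [Ne.symm hne]
    · have hstep : aStep1 (L, R) i = (L, R) := by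
        simp [aStep1, hR]
      have hle' : ∀ x, P.count x ≤ L.count x := by
        intro x
        have := hle x
        rcases eq_or_ne x i with rfl | hne
        · omega
        · rwa [List.count_cons_of_ne hne.symm] at this
      obtain ⟨h1, h2, h3, h4⟩ := ih L R hle'
      rw [List.foldl_cons, hstep]
      have hRz : R.count i = 0 := List.count_eq_zero.2 hR
      refine ⟨?_, ?_, h3, h4⟩
      · intro x
        rw [h1 x]
        rcases eq_or_ne x i with rfl | hne
        · rw [List.count_cons_self]; omega
        · rw [List.count_cons_of_ne hne.symm]
      · intro x
        rw [h2 x]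
        rcases eq_or_ne x i with rfl | hne
        · rw [List.count_cons_self]; omega
        · rw [List.count_cons_of_ne hne.symm]

-- two sorted lists of integers with the same counts are equal
theorem sorted_eq_of_counts {l₁ l₂ : List Int}
    (h₁ : l₁.Pairwise (· ≤ ·)) (h₂ : l₂.Pairwise (· ≤ ·))
    (hc : ∀ x, l₁.count x = l₂.count x) : l₁ = l₂ :=
  List.Perm.eq_of_pairwise (fun _ _ _ _ hab hba => le_antisymm hab hba) h₁ h₂
    (List.perm_iff_count.2 hc)

-- B's leftover-building loop, characterised: it appends to `out` a sublist of S whose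
-- count of x is S.count x minus what the cap (less the already-seen count) absorbs
theorem buildPhase (cap : PySem.Dict Int Int) (c : Int → ℕ)
    (hc : ∀ x, cap.getD x 0 = (c x : Int)) (S : List Int) :
    ∀ (d : PySem.Dict Int Int) (dd : Int → ℕ) (_ : ∀ x, d.getD x 0 = (dd x : Int))
      (out : List Int),
    ∃ T, (S.foldl (buildStep cap) (d, out)).2 = out ++ T ∧ T.Sublist S ∧
      ∀ x, T.count x = S.count x - min (S.count x) (c x - dd x) := by
  induction S with
  | nil => intro d dd hd out; exact ⟨[], by simp⟩
  | cons s S ih =>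
    intro d dd hd out
    have hd' : ∀ x, (d.insert s (d.getD s 0 + 1)).getD x 0
        = (((fun y => if y = s then dd y + 1 else dd y) x : ℕ) : Int) := by
      intro x
      rw [PySem.Dict.getD_insert]
      by_cases hx : x = s
      · rw [if_pos hx, hx, hd s]
        simp
      · rw [if_neg hx]
        simp only [hx, if_false]
        exact hd x
    by_cases hk : d.getD s 0 + 1 > cap.getD s 0
    · have hcs : c s ≤ dd s := by
        have h2 : (c s : Int) < (dd s : Int) + 1 := by rw [← hc s, ← hd s]; exact hk
        exact_mod_cast by omega
      obtain ⟨T, hT, hTs, hTc⟩ := ih (d.insert s (d.getD s 0 + 1)) _ hd' (out ++ [s])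
      refine ⟨s :: T, ?_, hTs.cons_cons s, ?_⟩
      · rw [List.foldl_cons]
        simp only [buildStep, if_pos hk]
        rw [hT, List.append_assoc]
        rfl
      · intro x
        have h1 := hTc x
        by_cases hx : x = s
        · subst hx
          simp only [if_true] at h1
          rw [List.count_cons_self, List.count_cons_self, h1]
          have e1 : c x - dd x = 0 := Nat.sub_eq_zero_of_le hcs
          have e2 : c x - (dd x + 1) = 0 := Nat.sub_eq_zero_of_le (by omega)
          rw [e1, e2]
          simp
        · rw [List.count_cons_of_ne (Ne.symm hx), List.count_cons_of_ne (Ne.symm hx), h1]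
          simp only [hx, if_false]
    · have hcs : dd s + 1 ≤ c s := by
        have h2 : (dd s : Int) + 1 ≤ (c s : Int) := by rw [← hc s, ← hd s]; omega
        exact_mod_cast h2
      obtain ⟨T, hT, hTs, hTc⟩ := ih (d.insert s (d.getD s 0 + 1)) _ hd' out
      refine ⟨T, ?_, hTs.trans (List.sublist_cons_self s S), ?_⟩
      · rw [List.foldl_cons]
        simp only [buildStep, if_neg hk]
        exact hT
      · intro x
        have h1 := hTc x
        by_cases hx : x = s
        · subst hx
          simp only [if_true] at h1
          rw [List.count_cons_self, h1]
          have e1 : c x - dd x = (c x - (dd x + 1)) + 1 := by omega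
          rw [e1]
          have e2 : min (S.count x + 1) (c x - (dd x + 1) + 1)
              = min (S.count x) (c x - (dd x + 1)) + 1 := by omega
          rw [e2]
          omega
        · rw [List.count_cons_of_ne (Ne.symm hx), h1]
          simp only [hx, if_false]

-- A's second loop leaves [] untouched
theorem foldl_aStep2_nil (R : List Int) : R.foldl aStep2 [] = [] := by
  induction R with
  | nil => rfl
  | cons r rs ih => simpa [aStep2] using ih

-- a head smaller than every lent value is never removed by A's second loop
theorem foldl_aStep2_cons (l : Int) (ls : List Int) :
    ∀ (R : List Int), (∀ r ∈ R, l + 1 < r) →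
    R.foldl aStep2 (l :: ls) = l :: R.foldl aStep2 ls := by
  intro R
  induction R generalizing ls with
  | nil => intro _; rfl
  | cons r rs ih =>
    intro h
    have hr := h r (List.mem_cons_self)
    have hstep : aStep2 (l :: ls) r = l :: aStep2 ls r := by
      have h1 : ((l :: ls).contains (r - 1)) = (ls.contains (r - 1)) := by
        simp
        omega
      have h2 : ((l :: ls).contains (r + 1)) = (ls.contains (r + 1)) := by
        simp
        omega
      unfold aStep2
      rw [h1, h2]
      by_cases hm1 : ls.contains (r - 1)
      · have hmem : (r - 1) ∈ (l :: ls) := List.mem_cons_of_mem l (by simpa using hm1)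
        have hmem' : (r - 1) ∈ ls := by simpa using hm1
        rw [if_pos hm1, if_pos hm1, pyRemove_of_mem hmem, pyRemove_of_mem hmem',
          List.erase_cons_tail (by simp; omega)]
      · rw [if_neg hm1, if_neg hm1]
        by_cases hm2 : ls.contains (r + 1)
        · have hmem : (r + 1) ∈ (l :: ls) := List.mem_cons_of_mem l (by simpa using hm2)
          have hmem' : (r + 1) ∈ ls := by simpa using hm2
          rw [if_pos hm2, if_pos hm2, pyRemove_of_mem hmem, pyRemove_of_mem hmem',
            List.erase_cons_tail (by simp; omega)]
        · rw [if_neg hm2, if_neg hm2]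
    rw [List.foldl_cons, hstep, List.foldl_cons]
    exact ih (aStep2 ls r) (fun r' hr' => h r' (List.mem_cons_of_mem r hr'))

-- the two-pointer scan counts exactly the elements A's second loop removes
theorem phase2_fuel (k : ℕ) : ∀ (L R : List Int) (m : Int), L.length + R.length ≤ k →
    L.Pairwise (· ≤ ·) → R.Pairwise (· ≤ ·) → (∀ x ∈ L, x ∉ R) →
    tpLoop L R m + ((R.foldl aStep2 L).length : Int) = m + (L.length : Int) := by
  induction k with
  | zero =>
    intro L R m hk _ _ _
    obtain rfl : L = [] := by
      cases L with
      | nil => rfl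
      | cons a as => simp at hk
    rw [foldl_aStep2_nil]
    simp [tpLoop]
  | succ k ih =>
    intro L R m hk hL hR hdisj
    match L, R with
    | [], R =>
      rw [foldl_aStep2_nil]
      simp [tpLoop]
    | l :: ls, [] =>
      simp [tpLoop]
    | l :: ls, r :: rs =>
      simp only [List.length_cons] at hk
      by_cases hlt : l < r - 1
      · have hall : ∀ r' ∈ r :: rs, l + 1 < r' := by
          intro r' hr'
          rcases List.mem_cons.1 hr' with rfl | hmem
          · omega
          · have := (List.pairwise_cons.1 hR).1 r' hmem
            omega
        rw [foldl_aStep2_cons l ls _ hall]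
        have := ih ls (r :: rs) m (by simp only [List.length_cons]; omega) (List.Pairwise.of_cons hL) hR
          (fun x hx => hdisj x (List.mem_cons_of_mem l hx))
        simp only [tpLoop, if_pos hlt]
        simp only [List.length_cons]
        omega
      · by_cases hgt : l > r + 1
        · have hmin : ∀ y ∈ l :: ls, l ≤ y := by
            intro y hy
            rcases List.mem_cons.1 hy with rfl | hmem
            · exact le_refl _
            · exact (List.pairwise_cons.1 hL).1 y hmem
          have hstep : aStep2 (l :: ls) r = l :: ls := by
            have h1 : (r - 1) ∉ (l :: ls) := by
              intro hmem
              have := hmin _ hmem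
              omega
            have h2 : (r + 1) ∉ (l :: ls) := by
              intro hmem
              have := hmin _ hmem
              omega
            simp only [aStep2, List.contains_eq_mem, decide_eq_true_eq]
            rw [if_neg h1, if_neg h2]
          rw [List.foldl_cons, hstep]
          have := ih (l :: ls) rs m (by simp only [List.length_cons]; omega) hL (List.Pairwise.of_cons hR)
            (fun x hx hxr => hdisj x hx (List.mem_cons_of_mem r hxr))
          simp only [tpLoop, if_neg hlt, if_pos hgt]
          omega
        · have hlr : l ≠ r := by
            intro h
            exact hdisj l List.mem_cons_self (h ▸ List.mem_cons_self)
          have hmin : ∀ y ∈ ls, l ≤ y := (List.pairwise_cons.1 hL).1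
          have hstep : aStep2 (l :: ls) r = ls := by
            rcases (by omega : l = r - 1 ∨ l = r + 1) with hle | hle
            · have h1 : (r - 1) ∈ (l :: ls) := by rw [← hle]; exact List.mem_cons_self
              simp only [aStep2, List.contains_eq_mem, decide_eq_true_eq]
              rw [if_pos h1, ← hle, pyRemove_of_mem List.mem_cons_self, List.erase_cons_head]
            · have h1 : (r - 1) ∉ (l :: ls) := by
                intro hmem
                rcases List.mem_cons.1 hmem with h | h
                · omega
                · have := hmin _ h
                  omega
              simp only [aStep2, List.contains_eq_mem, decide_eq_true_eq]
              rw [if_neg h1, if_pos (by rw [← hle]; exact List.mem_cons_self), ← hle,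
                pyRemove_of_mem List.mem_cons_self, List.erase_cons_head]
          rw [List.foldl_cons, hstep]
          have := ih ls rs (m + 1) (by omega) (List.Pairwise.of_cons hL)
            (List.Pairwise.of_cons hR)
            (fun x hx hxr => hdisj x (List.mem_cons_of_mem l hx) (List.mem_cons_of_mem r hxr))
          simp only [tpLoop, if_neg hlt, if_neg hgt]
          simp only [List.length_cons]
          omega

theorem phase2 (L R : List Int) (m : Int) :
    L.Pairwise (· ≤ ·) → R.Pairwise (· ≤ ·) → (∀ x ∈ L, x ∉ R) →
    tpLoop L R m + ((R.foldl aStep2 L).length : Int) = m + (L.length : Int) :=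
  phase2_fuel (L.length + R.length) L R m le_rfl

-- ===== VERDICT (by name: the statement is the Claim_ definition above) =====
theorem solution_spec : Claim_equal_solution := by
  intro n lost reserve _
  unfold Spec_solution solution solution_alt
  set L1 := PySem.List.sorted lost (fun x => x) false with hL1
  set R1 := PySem.List.sorted reserve (fun x => x) false with hR1
  have hLsort : L1.Pairwise (· ≤ ·) := PySem.List.sorted_pairwise lost (fun x => x)
  have hRsort : R1.Pairwise (· ≤ ·) := PySem.List.sorted_pairwise reserve (fun x => x)
  have hLcnt : ∀ x, L1.count x = lost.count x :=
    fun x => (PySem.List.sorted_perm lost (fun x => x) false).count_eq x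
  have hRcnt : ∀ x, R1.count x = reserve.count x :=
    fun x => (PySem.List.sorted_perm reserve (fun x => x) false).count_eq x
  obtain ⟨ha1, ha2, ha3, ha4⟩ := aPhase1 L1 L1 R1 (fun x => le_refl _)
  -- B's count dicts are the counters of lost / reserve
  have hcl : ∀ x, (lost.foldl (fun d x => d.insert x (d.getD x 0 + 1)) PySem.Dict.empty).getD x 0
      = ((lost.count x : ℕ) : Int) := by
    intro x
    rw [PySem.Dict.foldl_insert_getD_add_one_eq_counter, PySem.Dict.getD_counter]
  have hcr : ∀ x, (reserve.foldl (fun d x => d.insert x (d.getD x 0 + 1)) PySem.Dict.empty).getD x 0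
      = ((reserve.count x : ℕ) : Int) := by
    intro x
    rw [PySem.Dict.foldl_insert_getD_add_one_eq_counter, PySem.Dict.getD_counter]
  have hd0 : ∀ x : Int, (PySem.Dict.empty : PySem.Dict Int Int).getD x 0 = ((0 : ℕ) : Int) := by
    intro x; rfl
  obtain ⟨TL, hTL, hTLs, hTLc⟩ := buildPhase _ _ hcr L1 PySem.Dict.empty (fun _ => 0) hd0 []
  obtain ⟨TR, hTR, hTRs, hTRc⟩ := buildPhase _ _ hcl R1 PySem.Dict.empty (fun _ => 0) hd0 []
  rw [List.nil_append] at hTL hTR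
  simp only [Nat.sub_zero] at hTLc hTRc
  -- B's leftover lists coincide with A's lists after the first loop
  have heqL : TL = (L1.foldl aStep1 (L1, R1)).1 := by
    apply sorted_eq_of_counts (hLsort.sublist hTLs) (hLsort.sublist ha3)
    intro x
    rw [hTLc x, ha1 x, hRcnt x]
  have heqR : TR = (L1.foldl aStep1 (L1, R1)).2 := by
    apply sorted_eq_of_counts (hRsort.sublist hTRs) (hRsort.sublist ha4)
    intro x
    rw [hTRc x, ha2 x, hLcnt x]
    omega
  -- the two leftover lists are disjoint
  have hdisj : ∀ x ∈ TL, x ∉ TR := by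
    intro x hx hxr
    have h1 : 0 < TL.count x := List.count_pos_iff.2 hx
    have h2 : 0 < TR.count x := List.count_pos_iff.2 hxr
    rw [hTLc x] at h1
    rw [hTRc x] at h2
    have := hLcnt x
    have := hRcnt x
    omega
  have hmain := phase2 TL TR 0 (hLsort.sublist hTLs) (hRsort.sublist hTRs) hdisj
  rw [heqL, heqR] at hmain
  simp only [hTL, hTR, heqL, heqR]
  omega
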